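-- pv_equiv track=rewrite | github.com/federicodiazgerstner/ejercicios-programacion | Ejercicios/Ejercicio 3.04.py | fabprod
-- ===== SOURCE A (Python) =====
-- def fabprod(matriz):
--     filas = len(matriz)
--     columnas = len(matriz[0])
--     max = 0
--     fabrica = 0
--     dias = ["Lunes", "Martes", "Miércoles", "Jueves", "Viernes", "Sabado", "Domingo"]
--     dia = ""
--     for f in range(filas):
--         for c in range(columnas):
--             if matriz[f][c] > max:
--                 max = matriz[f][c]
--                 fabrica = f+1
--                 dia = dias[c]
--
--     return fabrica, dia
-- ===== SOURCE B (Python) =====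
-- def fabprod(matriz):
--     # Two-pass: find the global maximum over the day columns (the first row's width),
--     # then locate its first row-major occurrence.
--     dias = ["Lunes", "Martes", "Miércoles", "Jueves", "Viernes", "Sabado", "Domingo"]
--     ancho = len(matriz[0])
--     m = max((x for fila in matriz for x in fila[:ancho]), default=0)
--     if m <= 0:
--         return 0, ""
--     for f, fila in enumerate(matriz):
--         for c in range(ancho):
--             if fila[c] == m:
--                 return f + 1, dias[c]
-- ===== Notes on version B (the rewrite author's own statement) =====
-- stated objective: alternative
-- what changed: Replaces A's single fused running-maximum scan (with in-loop record updates) by a two-pass structure: first compute the global maximum of the day columns with max(..., default=0), then, if positive, a second row-major scan returns at the first cell equal to it.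
-- outside the precondition, e.g. on fabprod([[1, 0, 0, 0, 0, 0, 0, 0]]): A returns (1, 'Lunes'), B returns (1, 'Lunes')
import Mathlib
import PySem

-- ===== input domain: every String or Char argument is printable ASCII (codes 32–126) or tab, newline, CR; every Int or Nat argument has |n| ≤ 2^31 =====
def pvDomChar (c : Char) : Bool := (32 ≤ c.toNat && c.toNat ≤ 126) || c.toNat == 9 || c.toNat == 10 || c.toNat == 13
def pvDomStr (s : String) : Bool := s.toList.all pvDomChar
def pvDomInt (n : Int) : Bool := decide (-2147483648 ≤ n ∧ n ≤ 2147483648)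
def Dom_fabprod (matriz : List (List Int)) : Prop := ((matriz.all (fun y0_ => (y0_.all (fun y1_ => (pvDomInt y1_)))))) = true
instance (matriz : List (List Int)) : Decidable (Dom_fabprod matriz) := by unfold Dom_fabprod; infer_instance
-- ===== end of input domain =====

-- B replaces A's fused running-maximum scan by a two-pass structure (global max, then locate its
-- first row-major occurrence); objective: alternative decomposition, same cost.

-- ===== PORT A =====
def fabprod (matriz : List (List Int)) : Int × String :=
  let filas : Int := PySem.List.len matriz
  let columnas : Int := PySem.List.len (PySem.List.pyGetD matriz 0 [])
  let dias : List String := ["Lunes", "Martes", "Miércoles", "Jueves", "Viernes", "Sabado", "Domingo"]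
  let st :=
    (PySem.List.pyRange 0 filas 1).foldl (fun st f =>
      (PySem.List.pyRange 0 columnas 1).foldl (fun st2 c =>
        if PySem.List.pyGetD (PySem.List.pyGetD matriz f []) c 0 > st2.1 then
          (PySem.List.pyGetD (PySem.List.pyGetD matriz f []) c 0,
            (f + 1, PySem.List.pyGetD dias c ""))
        else st2) st)
      ((0 : Int), ((0 : Int), ""))
  st.2

-- ===== PORT B =====
-- inner early-return loop of B: first c (from s) with fila[c] == m
def fabLocRow (dias : List String) (m : Int) (f : Int) : List Int → Int → Option (Int × String)
  | [], _ => none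
  | x :: xs, c => if x > m ∨ x < m then fabLocRow dias m f xs (c + 1)
                  else some (f + 1, PySem.List.pyGetD dias c "")

-- outer early-return loop of B over the rows
def fabLoc (dias : List String) (m : Int) : List (List Int) → Int → Option (Int × String)
  | [], _ => none
  | fila :: rest, f =>
    match fabLocRow dias m f fila 0 with
    | some r => some r
    | none => fabLoc dias m rest (f + 1)

-- 'for c in range(ancho)' reading fila[c] iterates the first ancho elements of fila, and
-- fila[:ancho] is fila.take ancho (ancho = len(matriz[0]) ≥ 0): exact whenever ancho ≤ len fila
-- (guaranteed by Pre_; B raises IndexError like A on shorter rows).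
def fabprod_alt (matriz : List (List Int)) : Int × String :=
  let dias : List String := ["Lunes", "Martes", "Miércoles", "Jueves", "Viernes", "Sabado", "Domingo"]
  let ancho : Nat := (PySem.List.pyGetD matriz 0 []).length
  let m : Int := (PySem.List.max? (matriz.flatMap (fun fila => fila.take ancho)) (fun x => x)).getD 0
  if m ≤ 0 then (0, "")
  else (fabLoc dias m (matriz.map (fun fila => fila.take ancho)) 0).getD (0, "")

-- ===== PRECONDITION & SPEC =====
-- Pre_ excludes: the empty matrix (A raises IndexError on matriz[0]); matrices with a row shorter
-- than the first row (matriz[f][c] raises IndexError); and matrices whose first row is wider than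
-- the 7-day list, on which A raises IndexError on dias[c] whenever a new maximum appears in a
-- column ≥ 7 (which of those inputs raise is data-dependent, so all are excluded).
def Pre_fabprod (matriz : List (List Int)) : Prop :=
  matriz ≠ [] ∧ (matriz.headI).length ≤ 7 ∧
    ∀ fila ∈ matriz, (matriz.headI).length ≤ fila.length
instance (matriz : List (List Int)) : Decidable (Pre_fabprod matriz) := by
  unfold Pre_fabprod; infer_instance

def pvWitness_fabprod : List (List Int) := [[1, 2], [3, 4]]

def Spec_fabprod (matriz : List (List Int)) (out : Int × String) : Prop := out = fabprod_alt matriz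
instance (matriz : List (List Int)) (out : Int × String) : Decidable (Spec_fabprod matriz out) := by
  unfold Spec_fabprod; infer_instance

-- ===== CLAIM (what is proved, stated in full; the proofs are below) =====
def Claim_equal_fabprod : Prop := ∀ (matriz : List (List Int)), Dom_fabprod matriz → Pre_fabprod matriz → Spec_fabprod matriz (fabprod matriz)

-- ===== LEMMAS AND PROOFS =====

theorem fabLocRow_eq_none (dias : List String) (m f : Int) (fila : List Int) (s : Int)
    (h : ∀ y ∈ fila, y ≠ m) : fabLocRow dias m f fila s = none := by
  induction fila generalizing s with
  | nil => rfl
  | cons x xs ih =>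
    have hx : x ≠ m := h x (by simp)
    simp only [fabLocRow]
    rw [if_pos (by omega)]
    exact ih (s + 1) (fun y hy => h y (List.mem_cons_of_mem _ hy))

theorem fabLocRow_isSome (dias : List String) (m f : Int) (fila : List Int) (s : Int)
    (h : m ∈ fila) : ∃ r, fabLocRow dias m f fila s = some r := by
  induction fila generalizing s with
  | nil => simp at h
  | cons x xs ih =>
    simp only [fabLocRow]
    by_cases hx : x > m ∨ x < m
    · rw [if_pos hx]
      have hm : m ∈ xs := by
        rcases List.mem_cons.mp h with h1 | h1
        · omega
        · exact h1
      exact ih (s + 1) hm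
    · rw [if_neg hx]; exact ⟨_, rfl⟩

theorem fabLoc_isSome (dias : List String) (m f : Int) (rows : List (List Int))
    (h : ∃ fila ∈ rows, m ∈ fila) : ∃ r, fabLoc dias m rows f = some r := by
  induction rows generalizing f with
  | nil => simp at h
  | cons fila rest ih =>
    cases h0 : fabLocRow dias m f fila 0 with
    | some r => exact ⟨r, by simp [fabLoc, h0]⟩
    | none =>
      rcases h with ⟨fila', hmem, hm⟩
      rcases List.mem_cons.mp hmem with h1 | h1
      · subst h1
        rcases fabLocRow_isSome dias m f fila' 0 hm with ⟨r, hr⟩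
        rw [h0] at hr
        exact absurd hr (by simp)
      · rcases ih (f + 1) ⟨fila', h1, hm⟩ with ⟨r, hr⟩
        exact ⟨r, by simp [fabLoc, h0, hr]⟩

-- running max over a list: pulling a max out of the seed
theorem foldl_max_max (t : List Int) (a y : Int) :
    t.foldl max (max a y) = max a (t.foldl max y) := by
  induction t generalizing y with
  | nil => rfl
  | cons z t ih =>
    simp only [List.foldl_cons]
    rw [max_assoc, ih]

-- seed is ≤ the rows-fold of running maxima
theorem le_rowsFold (rows : List (List Int)) (mx : Int) :
    mx ≤ rows.foldl (fun acc fila => fila.foldl max acc) mx := by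
  induction rows generalizing mx with
  | nil => simp
  | cons fila rest ih =>
    simp only [List.foldl_cons]
    exact le_trans (PySem.List.le_foldl_max fila mx).1 (ih _)

theorem rowsFold_mem (rows : List (List Int)) (mx : Int) :
    rows.foldl (fun acc fila => fila.foldl max acc) mx = mx ∨
      ∃ fila ∈ rows, rows.foldl (fun acc fila => fila.foldl max acc) mx ∈ fila := by
  induction rows generalizing mx with
  | nil => left; rfl
  | cons fila rest ih =>
    simp only [List.foldl_cons]
    rcases ih (fila.foldl max mx) with h | ⟨fila', h1, h2⟩
    · rw [h]
      rcases PySem.List.foldl_max_mem fila mx with h2 | h2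
      · left; exact h2
      · right; exact ⟨fila, by simp, h2⟩
    · right; exact ⟨fila', by simp [h1], h2⟩

theorem rowsFold_eq_flatten (rows : List (List Int)) (mx : Int) :
    rows.foldl (fun acc fila => fila.foldl max acc) mx =
      (rows.flatMap (fun fila => fila)).foldl max mx := by
  induction rows generalizing mx with
  | nil => rfl
  | cons fila rest ih =>
    simp only [List.foldl_cons, List.flatMap_cons, List.foldl_append]
    exact ih _

-- the inner loop of A, on the enumerated row
theorem rowA_enum (dias : List String) (f : Int) (fila : List Int) (s mx : Int)
    (out : Int × String) :
    (PySem.List.enumerate fila s).foldl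
        (fun st2 p => if p.2 > st2.1 then (p.2, (f + 1, PySem.List.pyGetD dias p.1 "")) else st2)
        (mx, out)
      = (fila.foldl max mx,
          if fila.foldl max mx > mx
          then (fabLocRow dias (fila.foldl max mx) f fila s).getD out else out) := by
  induction fila generalizing s mx out with
  | nil => simp [PySem.List.enumerate_nil]
  | cons x xs ih =>
    rw [PySem.List.enumerate_cons]
    simp only [List.foldl_cons]
    by_cases hx : x > mx
    · rw [if_pos hx]
      rw [ih]
      have hmaxeq : max mx x = x := max_eq_right (le_of_lt hx)
      have hFx : x ≤ xs.foldl max x := (PySem.List.le_foldl_max xs x).1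
      simp only [hmaxeq]
      by_cases hF : xs.foldl max x > x
      · rw [if_pos hF, if_pos (by omega)]
        have hmem : xs.foldl max x ∈ xs := by
          rcases PySem.List.foldl_max_mem xs x with h | h
          · omega
          · exact h
        rcases fabLocRow_isSome dias (xs.foldl max x) f xs (s + 1) hmem with ⟨r, hr⟩
        simp only [fabLocRow]
        rw [if_pos (by omega), hr]
        simp
      · have hFeq : xs.foldl max x = x := by omega
        rw [if_neg hF, if_pos (by omega), hFeq]
        simp only [fabLocRow]
        rw [if_neg (by omega)]
        rfl
    · rw [if_neg hx]
      rw [ih]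
      have hmaxeq : max mx x = mx := max_eq_left (by omega)
      simp only [hmaxeq]
      by_cases hG : xs.foldl max mx > mx
      · rw [if_pos hG, if_pos hG]
        simp only [fabLocRow]
        rw [if_pos (by omega)]
      · rw [if_neg hG, if_neg hG]

-- the inner loop of A, in its literal pyRange form (row of the right width)
theorem rowA_range (dias : List String) (f : Int) (fila : List Int) (mx : Int)
    (out : Int × String) :
    (PySem.List.pyRange 0 (PySem.List.len fila) 1).foldl
        (fun st2 c => if PySem.List.pyGetD fila c 0 > st2.1
          then (PySem.List.pyGetD fila c 0, (f + 1, PySem.List.pyGetD dias c ""))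
          else st2) (mx, out)
      = (fila.foldl max mx,
          if fila.foldl max mx > mx
          then (fabLocRow dias (fila.foldl max mx) f fila 0).getD out else out) := by
  have hmap := PySem.List.enumerate_eq_map_pyRange fila (0 : Int)
  have := rowA_enum dias f fila 0 mx out
  rw [hmap] at this
  rw [List.foldl_map] at this
  exact this

-- the outer loop of A on the enumerated rows, for a rectangular block of width `columnas`
theorem outerA (dias : List String) (columnas : Int) (rows : List (List Int)) (f mx : Int)
    (out : Int × String) (hrect : ∀ fila ∈ rows, (fila.length : Int) = columnas) :
    (PySem.List.enumerate rows f).foldl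
        (fun st p =>
          (PySem.List.pyRange 0 columnas 1).foldl
            (fun st2 c => if PySem.List.pyGetD p.2 c 0 > st2.1
              then (PySem.List.pyGetD p.2 c 0, (p.1 + 1, PySem.List.pyGetD dias c ""))
              else st2) st) (mx, out)
      = (rows.foldl (fun acc fila => fila.foldl max acc) mx,
          if rows.foldl (fun acc fila => fila.foldl max acc) mx > mx
          then (fabLoc dias (rows.foldl (fun acc fila => fila.foldl max acc) mx) rows f).getD out
          else out) := by
  induction rows generalizing f mx out with
  | nil => simp [PySem.List.enumerate_nil]
  | cons fila rest ih =>
    rw [PySem.List.enumerate_cons]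
    simp only [List.foldl_cons]
    have hlen : (fila.length : Int) = columnas := hrect fila (by simp)
    have hstep : (PySem.List.pyRange 0 columnas 1).foldl
        (fun st2 c => if PySem.List.pyGetD fila c 0 > st2.1
          then (PySem.List.pyGetD fila c 0, (f + 1, PySem.List.pyGetD dias c ""))
          else st2) (mx, out)
        = (fila.foldl max mx,
            if fila.foldl max mx > mx
            then (fabLocRow dias (fila.foldl max mx) f fila 0).getD out else out) := by
      rw [← hlen, ← PySem.List.len_eq]
      exact rowA_range dias f fila mx out
    rw [hstep]
    rw [ih (f + 1) _ _ (fun fila' h => hrect fila' (by simp [h]))]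
    set m1 := fila.foldl max mx with hm1
    set o1 := if m1 > mx then (fabLocRow dias m1 f fila 0).getD out else out with ho1
    set M := rest.foldl (fun acc fila => fila.foldl max acc) m1 with hM
    have hmxm1 : mx ≤ m1 := (PySem.List.le_foldl_max fila mx).1
    have hm1M : m1 ≤ M := le_rowsFold rest m1
    by_cases hMm1 : M > m1
    · -- the final max lives in a later row
      have hmemM : ∃ fila' ∈ rest, M ∈ fila' := by
        rcases rowsFold_mem rest m1 with h | h
        · omega
        · exact h
      have hnone : fabLocRow dias M f fila 0 = none :=
        fabLocRow_eq_none dias M f fila 0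
          (fun y hy => by have := (PySem.List.le_foldl_max fila mx).2 y hy; omega)
      rcases fabLoc_isSome dias M (f + 1) rest hmemM with ⟨r, hr⟩
      rw [if_pos hMm1, if_pos (by omega)]
      simp only [fabLoc]
      rw [hnone, hr]
      simp
    · have hMeq : M = m1 := by omega
      rw [if_neg hMm1, hMeq]
      by_cases hm1mx : m1 > mx
      · rw [if_pos hm1mx]
        have hmem : m1 ∈ fila := by
          rcases PySem.List.foldl_max_mem fila mx with h | h
          · omega
          · exact h
        rcases fabLocRow_isSome dias m1 f fila 0 hmem with ⟨r, hr⟩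
        simp only [fabLoc]
        rw [hr, ho1, if_pos hm1mx, hr]
      · rw [if_neg hm1mx, ho1, if_neg hm1mx]

-- enumerate after a map
theorem enumMap_pv {α β : Type} (g : α → β) (xs : List α) (s : Int) :
    PySem.List.enumerate (xs.map g) s = (PySem.List.enumerate xs s).map (fun p => (p.1, g p.2)) := by
  induction xs generalizing s with
  | nil => simp [PySem.List.enumerate_nil]
  | cons x xs ih => simp [PySem.List.enumerate_cons, ih]

-- A's inner loop only reads the first k cells of a row of length ≥ k
theorem innerTake_pv (dias : List String) (k : Nat) (fila : List Int) (f : Int)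
    (hk : k ≤ fila.length) (st : Int × (Int × String)) :
    (PySem.List.pyRange 0 (k : Int) 1).foldl
        (fun st2 c => if PySem.List.pyGetD fila c 0 > st2.1
          then (PySem.List.pyGetD fila c 0, (f + 1, PySem.List.pyGetD dias c ""))
          else st2) st
      = (PySem.List.pyRange 0 (k : Int) 1).foldl
        (fun st2 c => if PySem.List.pyGetD (fila.take k) c 0 > st2.1
          then (PySem.List.pyGetD (fila.take k) c 0, (f + 1, PySem.List.pyGetD dias c ""))
          else st2) st := by
  apply PySem.List.foldl_congr_mem
  intro acc c hc
  obtain ⟨hc0, hck⟩ := PySem.List.mem_pyRange_one.mp hc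
  have hlt : c < (fila.length : Int) := by omega
  have hlt' : c < ((fila.take k).length : Int) := by
    simp [List.length_take]
    omega
  have hget : PySem.List.pyGetD fila c 0 = PySem.List.pyGetD (fila.take k) c 0 := by
    rw [PySem.List.pyGetD_eq_getElem fila 0 hc0 hlt,
      PySem.List.pyGetD_eq_getElem (fila.take k) 0 hc0 hlt']
    exact (List.getElem_take).symm
  rw [hget]

-- ===== VERDICT (by name: the statement is the Claim_ definition above) =====
theorem fabprod_spec : Claim_equal_fabprod := by
  intro matriz _ hpre
  obtain ⟨hne, _, hlong⟩ := hpre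
  rcases matriz with _ | ⟨fila0, rest⟩
  · exact absurd rfl hne
  unfold Spec_fabprod fabprod fabprod_alt
  simp only []
  have hk : ∀ fila ∈ fila0 :: rest, fila0.length ≤ fila.length := by
    intro fila h
    simpa using hlong fila h
  have hcol : PySem.List.pyGetD (fila0 :: rest) 0 ([] : List Int) = fila0 :=
    PySem.List.pyGetD_zero_cons fila0 rest []
  rw [hcol]
  set dias : List String :=
    ["Lunes", "Martes", "Miércoles", "Jueves", "Viernes", "Sabado", "Domingo"] with hdias
  set k : Nat := fila0.length with hkdef
  have hlenk : PySem.List.len fila0 = (k : Int) := by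
    simp [PySem.List.len_eq, hkdef]
  simp only [hlenk]
  -- characterize A's double loop via the truncated rows
  have hA := outerA dias (k : Int) ((fila0 :: rest).map (fun fila => fila.take k)) 0 0
      ((0 : Int), "")
      (by
        intro fila h
        rcases List.mem_map.mp h with ⟨fila', h1, h2⟩
        subst h2
        have := hk fila' h1
        simp [List.length_take]
        omega)
  rw [enumMap_pv, List.foldl_map] at hA
  rw [PySem.List.enumerate_eq_map_pyRange (fila0 :: rest) ([] : List Int), List.foldl_map] at hA
  simp only [] at hA
  have hcongr :
      (PySem.List.pyRange 0 (PySem.List.len (fila0 :: rest)) 1).foldl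
        (fun st f =>
          (PySem.List.pyRange 0 (k : Int) 1).foldl
            (fun st2 c => if PySem.List.pyGetD (PySem.List.pyGetD (fila0 :: rest) f []) c 0 > st2.1
              then (PySem.List.pyGetD (PySem.List.pyGetD (fila0 :: rest) f []) c 0,
                (f + 1, PySem.List.pyGetD dias c ""))
              else st2) st) ((0 : Int), ((0 : Int), ""))
      = (PySem.List.pyRange 0 (PySem.List.len (fila0 :: rest)) 1).foldl
        (fun st f =>
          (PySem.List.pyRange 0 (k : Int) 1).foldl
            (fun st2 c => if PySem.List.pyGetD ((PySem.List.pyGetD (fila0 :: rest) f []).take k) c 0 > st2.1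
              then (PySem.List.pyGetD ((PySem.List.pyGetD (fila0 :: rest) f []).take k) c 0,
                (f + 1, PySem.List.pyGetD dias c ""))
              else st2) st) ((0 : Int), ((0 : Int), "")) := by
    apply PySem.List.foldl_congr_mem
    intro acc f hf
    obtain ⟨hf0, hflt⟩ := PySem.List.mem_pyRange_one.mp hf
    have hmem : PySem.List.pyGetD (fila0 :: rest) f ([] : List Int) ∈ fila0 :: rest := by
      apply PySem.List.pyGetD_mem
      simp only [PySem.List.len_eq] at hflt
      constructor <;> omega
    exact innerTake_pv dias k _ f (hk _ hmem) acc
  rw [hcongr, hA]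
  -- B's flattened truncated elements equal the rows-fold flatten
  have hflatmap : ((fila0 :: rest).map (fun fila => fila.take k)).flatMap (fun fila => fila)
      = (fila0 :: rest).flatMap (fun fila => fila.take k) := by
    rw [List.flatMap_map]
  rcases hflat : (fila0 :: rest).flatMap (fun fila => fila.take k) with _ | ⟨y, t⟩
  · have hM : ((fila0 :: rest).map (fun fila => fila.take k)).foldl
        (fun acc fila => fila.foldl max acc) 0 = 0 := by
      rw [rowsFold_eq_flatten, hflatmap, hflat]
      rfl
    rw [hM]
    simp [hflat, PySem.List.max?]
  · have hM : ((fila0 :: rest).map (fun fila => fila.take k)).foldl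
        (fun acc fila => fila.foldl max acc) 0 = max 0 (t.foldl max y) := by
      rw [rowsFold_eq_flatten, hflatmap, hflat]
      simp only [List.foldl_cons]
      rw [← foldl_max_max t 0 y]
    rw [hM]
    simp only [hflat, PySem.List.max?_id_cons, Option.getD_some]
    by_cases hm : t.foldl max y ≤ 0
    · rw [if_pos hm]
      have h0 : max 0 (t.foldl max y) = 0 := by omega
      rw [h0]
      simp
    · have h0 : max 0 (t.foldl max y) = t.foldl max y := by omega
      rw [h0, if_neg hm, if_pos (by omega)]
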